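-- pv_equiv track=rewrite | github.com/notthattal/Python-Practice-Questions | interview_qs.py | longestSeqOnes
-- ===== SOURCE A (Python) =====
-- def longestSeqOnes(num: int) -> int:
--     if num+1 & num == 0 and num != 0:
--         return len(bin(num)) - 2
--     curr_len = 0
--     prev_len = 0
--     max_len = 1
--     while num > 0:
--         if (num & 1) == 1:
--             curr_len += 1
--         elif (num & 1) == 0:
--             prev_len = 0 if ((num & 2) == 0) else curr_len
--             curr_len = 0
--         max_len = max(prev_len + curr_len + 1, max_len)
--         num = num >> 1
--
--     return max_len
-- ===== SOURCE B (Python) =====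
-- def longestSeqOnes(num: int) -> int:
--     if num <= 0:
--         return 1
--     s = bin(num)[2:]
--     groups = s.split('0')
--     if len(groups) == 1:
--         return len(s)
--     return 1 + max(len(a) + len(b) for a, b in zip(groups, groups[1:]))
-- ===== Notes on version B (the rewrite author's own statement) =====
-- stated objective: idiomatic
-- what changed: Replaces the bit-by-bit shift/mask loop with prev/curr state by splitting bin(num)[2:] on '0' into one-runs and taking 1 + the largest sum of adjacent run lengths (empty runs from consecutive zeros block joining), with an early num <= 0 baseline.
-- intended difference: For num = -1 A's all-ones guard fires and returns len(bin(-1))-2 = 2, accidentally counting the '-' sign; B returns 1, the baseline A itself returns for every other negative input, which is the intended value since -1 has no binary run structure. — e.g. on longestSeqOnes(-1): A returns 2, B returns 1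
import Mathlib
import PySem

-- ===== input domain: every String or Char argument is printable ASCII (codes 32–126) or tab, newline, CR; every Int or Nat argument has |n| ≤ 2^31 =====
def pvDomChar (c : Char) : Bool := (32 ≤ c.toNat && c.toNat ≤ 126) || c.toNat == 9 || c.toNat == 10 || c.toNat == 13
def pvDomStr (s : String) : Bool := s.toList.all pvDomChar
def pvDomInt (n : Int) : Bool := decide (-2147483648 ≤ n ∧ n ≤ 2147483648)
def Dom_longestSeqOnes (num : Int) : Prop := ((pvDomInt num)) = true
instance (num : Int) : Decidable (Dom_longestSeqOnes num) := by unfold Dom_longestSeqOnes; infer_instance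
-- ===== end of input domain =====

-- B rewrites the bit-shifting loop as a split of bin(num) on '0' into one-runs joined across single zeros (idiomatic); A's return for num = -1 is stated as an intended difference below.


-- ===== PORT A =====
-- A's `while num > 0` loop; Python `num >> 1` is Lean's `>>> (1:Nat)` (arithmetic shift), `&` is PySem.Int.band.
def longestSeqOnesLoop (num curr_len prev_len max_len : Int) : Int :=
  if h : 0 < num then
    let st :=
      if PySem.Int.band num 1 = 1 then (curr_len + 1, prev_len)
      else if PySem.Int.band num 1 = 0 then
        ((0 : Int), if PySem.Int.band num 2 = 0 then 0 else curr_len)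
      else (curr_len, prev_len)
    longestSeqOnesLoop (num >>> (1 : Nat)) st.1 st.2 (max (st.2 + st.1 + 1) max_len)
  else max_len
termination_by num.toNat
decreasing_by
  simp only [Int.shiftRight_eq_div_pow]
  omega

def longestSeqOnes (num : Int) : Int :=
  -- `num+1 & num == 0 and num != 0` (Python precedence: (num+1) & num)
  if PySem.Int.band (num + 1) num = 0 ∧ num ≠ 0 then PySem.Str.len (PySem.Int.pyBin num) - 2
  else longestSeqOnesLoop num 0 0 1

-- ===== PORT B =====
def longestSeqOnes_alt (num : Int) : Int :=
  if num ≤ 0 then 1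
  else
    let s := PySem.Chars.slice (PySem.Int.pyBin num).toList (some 2) none   -- bin(num)[2:]
    let groups := PySem.Chars.splitOn s ['0']                               -- s.split('0')
    if groups.length = 1 then (s.length : Int)
    else
      -- 1 + max(len(a) + len(b) for a, b in zip(groups, groups[1:])); the list is
      -- nonempty here (groups.length ≥ 2), so Python's max never raises; getD 0 is unreachable
      1 + ((PySem.List.max? ((groups.zip (groups.drop 1)).map
            (fun p => ((p.1.length : Int) + (p.2.length : Int)))) (fun x => x)).getD 0)

-- ===== PRECONDITION & SPEC =====
-- For num = -1 A's all-ones guard fires ((-1+1)&-1 == 0) and it returns len(bin(-1))-2 = 2,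
-- accidentally counting the '-' sign; B returns 1, the same baseline A itself returns for every
-- other nonpositive input, which is the intended value since -1 has no binary run structure.
def D_longestSeqOnes (num : Int) : Prop := num = -1
instance (num : Int) : Decidable (D_longestSeqOnes num) := by unfold D_longestSeqOnes; infer_instance
def Spec_longestSeqOnes (num : Int) (out : Int) : Prop := ¬ D_longestSeqOnes num → out = longestSeqOnes_alt num
instance (num : Int) (out : Int) : Decidable (Spec_longestSeqOnes num out) := by unfold Spec_longestSeqOnes; infer_instance
def pvDiffWitness_longestSeqOnes : Int := -1
def pvDiffWitnessOut_longestSeqOnes : Int × Int := (2, 1)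

-- ===== CLAIM (what is proved, stated in full; the proofs are below) =====
def Claim_unchanged_longestSeqOnes : Prop := ∀ (num : Int), Dom_longestSeqOnes num → Spec_longestSeqOnes num (longestSeqOnes num)
def Claim_changed_longestSeqOnes : Prop := Dom_longestSeqOnes (pvDiffWitness_longestSeqOnes) ∧ D_longestSeqOnes (pvDiffWitness_longestSeqOnes) ∧ longestSeqOnes (pvDiffWitness_longestSeqOnes) = pvDiffWitnessOut_longestSeqOnes.1 ∧ longestSeqOnes_alt (pvDiffWitness_longestSeqOnes) = pvDiffWitnessOut_longestSeqOnes.2 ∧ pvDiffWitnessOut_longestSeqOnes.1 ≠ pvDiffWitnessOut_longestSeqOnes.2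
def Claim_exact_longestSeqOnes : Prop := ∀ (num : Int), Dom_longestSeqOnes num → D_longestSeqOnes num → longestSeqOnes num ≠ longestSeqOnes_alt num

-- ===== LEMMAS AND PROOFS =====

-- bits of a natural number, least-significant first
def natBits (n : Nat) : List Bool :=
  if n = 0 then [] else (decide (n % 2 = 1)) :: natBits (n / 2)
decreasing_by exact Nat.div_lt_self (by omega) (by omega)

def bitChar (b : Bool) : Char := if b then '1' else '0'

-- run lengths: groups of consecutive `true`s obtained by splitting on every `false`
def glens : List Bool → List Nat
  | [] => [0]
  | true :: L => match glens L with | [] => [1] | g :: gs => (g + 1) :: gs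
  | false :: L => 0 :: glens L

def addHead (c : Nat) : List Nat → List Nat
  | [] => []
  | g :: gs => (g + c) :: gs

-- max over adjacent-pair sums, with the final element as a (always dominated) base case
def pairsB : List Nat → Nat
  | [] => 0
  | [n] => n
  | a :: b :: t => max (a + b) (pairsB (b :: t))

def pairsMaxN : List Nat → Nat
  | a :: b :: t => max (a + b) (pairsMaxN (b :: t))
  | _ => 0

def modLast : List Nat → List Nat
  | [] => []
  | [x] => [x + 1]
  | x :: y :: t => x :: modLast (y :: t)

-- A's loop on the bit list (lookahead `num & 2` = head of the remaining bits)
def listLoop : List Bool → Int → Int → Int → Int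
  | [], _, _, m => m
  | b :: rest, c, p, m =>
      let st := if b then (c + 1, p) else ((0 : Int), if rest.headD false then c else 0)
      listLoop rest st.1 st.2 (max (st.2 + st.1 + 1) m)

-- best step value (prev'+curr'+1) over the whole run of the loop
def bestF : List Bool → Int → Int → Int
  | [], _, _ => 0
  | b :: rest, c, p =>
      let st := if b then (c + 1, p) else ((0 : Int), if rest.headD false then c else 0)
      max (st.2 + st.1 + 1) (bestF rest st.1 st.2)

-- structural model of s.split('0')
def consHead (pre : List Char) : List (List Char) → List (List Char)
  | [] => [pre]
  | g :: gs => (pre ++ g) :: gs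

def mySplit : List Char → List (List Char)
  | [] => [[]]
  | c :: t => if c = '0' then [] :: mySplit t else consHead [c] (mySplit t)

theorem natBits_zero : natBits 0 = [] := by
  unfold natBits; rfl

theorem natBits_pos (n : Nat) (h : 0 < n) : natBits n = (decide (n % 2 = 1)) :: natBits (n / 2) := by
  rw [natBits]; have : n ≠ 0 := by omega
  simp [this]


theorem glens_ne_nil (L : List Bool) : glens L ≠ [] := by
  induction L with
  | nil => simp [glens]
  | cons b t ih =>
    cases b <;> simp [glens]
    cases h : glens t <;> simp


theorem glens_true (L : List Bool) : glens (true :: L) = ((glens L).headD 0 + 1) :: (glens L).tail := by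
  cases h : glens L
  · exact absurd h (glens_ne_nil L)
  · simp [glens, h]

theorem glens_false (L : List Bool) : glens (false :: L) = 0 :: glens L := rfl

theorem land_succ_iff (n : Nat) : (n + 1) &&& n = 0 ↔ false ∉ natBits n := by
  induction n using Nat.strong_induction_on with
  | _ n ih =>
    rcases Nat.eq_zero_or_pos n with h0 | hpos
    · subst h0; simp [natBits_zero]
    · rw [natBits_pos n hpos]
      rcases Nat.even_or_odd n with he | ho
      · -- n even, n > 0 : both sides false
        obtain ⟨m, hm⟩ := he
        have hm' : n = 2 * m := by omega
        have hb : (decide (n % 2 = 1)) = false := by simp; omega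
        constructor
        · intro hland
          exfalso
          have hmne : m ≠ 0 := by omega
          -- all test bits of m are false, hence m = 0
          apply hmne
          apply Nat.zero_of_testBit_eq_false
          intro i
          by_contra htb
          have hb : ((n + 1) &&& n).testBit (i + 1) = true := by
            rw [Nat.testBit_land, Nat.testBit_add_one, Nat.testBit_add_one]
            have h1 : (n + 1) / 2 = m := by omega
            have h2 : n / 2 = m := by omega
            rw [h1, h2]
            simp at htb
            simp [htb]
          rw [hland] at hb
          simp [Nat.zero_testBit] at hb
        · intro hmem
          exfalso
          exact hmem (by simp [hb])
      · -- n odd: n = 2 m + 1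
        obtain ⟨m, hm⟩ := ho
        have hmod : n % 2 = 1 := by omega
        have hdiv : n / 2 = m := by omega
        have key : ((n + 1) &&& n = 0) ↔ ((m + 1) &&& m = 0) := by
          constructor
          · intro hland
            apply Nat.zero_of_testBit_eq_false
            intro i
            by_contra htb
            have hb : ((n + 1) &&& n).testBit (i + 1) = true := by
              rw [Nat.testBit_land, Nat.testBit_add_one, Nat.testBit_add_one]
              have h1 : (n + 1) / 2 = m + 1 := by omega
              rw [h1, hdiv]
              rw [Nat.testBit_land] at htb
              simp only [Bool.not_eq_false] at htb
              simp_all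
            rw [hland] at hb
            simp [Nat.zero_testBit] at hb
          · intro hland
            apply Nat.zero_of_testBit_eq_false
            intro i
            cases i with
            | zero =>
              rw [Nat.testBit_land, Nat.testBit_zero, Nat.testBit_zero]
              have : (n + 1) % 2 = 0 := by omega
              simp [this]
            | succ j =>
              rw [Nat.testBit_land, Nat.testBit_add_one, Nat.testBit_add_one]
              have h1 : (n + 1) / 2 = m + 1 := by omega
              rw [h1, hdiv]
              have : ((m + 1) &&& m).testBit j = false := by rw [hland]; simp [Nat.zero_testBit]
              rw [Nat.testBit_land] at this
              simp only [Bool.and_eq_false_iff] at this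
              rcases this with h | h <;> simp [h]
        rw [key, hdiv, hmod]
        have := ih m (by omega)
        simp [this]

theorem loop_eq_listLoop (n : Nat) (c p m : Int) :
    longestSeqOnesLoop (n : Int) c p m = listLoop (natBits n) c p m := by
  induction n using Nat.strong_induction_on generalizing c p m with
  | _ n ih =>
    rcases Nat.eq_zero_or_pos n with h0 | hpos
    · subst h0
      rw [longestSeqOnesLoop, natBits_zero]
      simp [listLoop]
    · rw [longestSeqOnesLoop, natBits_pos n hpos]
      have hgt : (0 : Int) < (n : Int) := by exact_mod_cast hpos
      rw [dif_pos hgt]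
      have hb1 : PySem.Int.band (n : Int) 1 = ((n &&& 1 : Nat) : Int) := by
        exact_mod_cast PySem.Int.band_natCast n 1
      have hb2 : PySem.Int.band (n : Int) 2 = ((n &&& 2 : Nat) : Int) := by
        exact_mod_cast PySem.Int.band_natCast n 2
      have hm1 : n &&& 1 = n % 2 := Nat.and_one_is_mod n
      have hm2 : n &&& 2 = (n.testBit 1).toNat * 2 := by
        have := Nat.and_two_pow n 1
        simpa using this
      have hshift : ((n : Int) >>> (1 : Nat)) = ((n / 2 : Nat) : Int) := by
        rw [← Int.natCast_shiftRight]
        norm_num [Nat.shiftRight_succ, Nat.shiftRight_zero]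
      have hhead : (natBits (n / 2)).headD false = n.testBit 1 := by
        rw [Nat.testBit_add_one]
        rcases Nat.eq_zero_or_pos (n / 2) with hz | hz
        · rw [hz, natBits_zero]; simp
        · rw [natBits_pos _ hz]; simp [Nat.testBit_zero]
      rw [listLoop]
      simp only [hb1, hb2, hm1, hm2, hshift, hhead]
      have e1 : ((n % 2 : Nat) : Int) = 1 ↔ n % 2 = 1 := by
        constructor <;> intro h <;> exact_mod_cast h
      have e0 : ((n % 2 : Nat) : Int) = 0 ↔ n % 2 = 0 := by
        constructor <;> intro h <;> exact_mod_cast h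
      have e2 : (((n.testBit 1).toNat * 2 : Nat) : Int) = 0 ↔ n.testBit 1 = false := by
        cases n.testBit 1 <;> simp
      have hr2 : n % 2 = 0 ∨ n % 2 = 1 := by omega
      rcases hr2 with hr | hr <;> cases htb : n.testBit 1 <;>
        simp only [e1, e0, e2, hr, htb] <;>
        simp only [if_true, if_false, decide_true, decide_false, Bool.false_eq_true,
          one_ne_zero, zero_ne_one, ite_true, ite_false, if_pos rfl] <;>
        simp <;>
        exact ih (n / 2) (by omega) _ _ _

theorem listLoop_eq_max (L : List Bool) (c p m : Int) (hc : 0 ≤ c) (hp : 0 ≤ p) (hm : 0 ≤ m) :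
    listLoop L c p m = max m (bestF L c p) := by
  induction L generalizing c p m with
  | nil => simp [listLoop, bestF]; omega
  | cons b rest ih =>
    rw [listLoop, bestF]
    cases b <;> simp only [if_true, if_false, Bool.false_eq_true, ite_true, ite_false]
    · by_cases hl : rest.headD false = true <;> simp only [hl, ite_true, ite_false, if_pos, if_neg] <;>
      · rw [ih _ _ _ (by omega) (by omega) (by omega)]
        omega
    · rw [ih _ _ _ (by omega) (by omega) (by omega)]
      omega

theorem main_bestF (k : Nat) : ∀ (L : List Bool) (c p : Int), L.length ≤ k → L ≠ [] → 0 ≤ c → 0 ≤ p →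
    (L.headD false = true ∨ (c = 0 ∧ p = 0)) →
    bestF L c p = 1 + max (p + c + ((glens L).headD 0 : Int)) ((pairsB (addHead c.toNat (glens L)) : Int)) := by
  induction k with
  | zero => intro L c p hlen hne _ _ _; cases L <;> simp_all
  | succ k ih =>
    intro L c p hlen hne hc hp hdisj
    have hc' : ((c.toNat : Nat) : Int) = c := Int.toNat_of_nonneg hc
    cases L with
    | nil => exact absurd rfl hne
    | cons b rest =>
      cases b
      · -- leading false: invariant forces c = 0, p = 0
        have hcp : c = 0 ∧ p = 0 := by
          rcases hdisj with h | h
          · simp at h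
          · exact h
        obtain ⟨hc0, hp0⟩ := hcp
        subst hc0; subst hp0
        rw [bestF]
        simp only [Bool.false_eq_true, ite_false, ite_self]
        cases rest with
        | nil => simp [bestF, glens, addHead, pairsB]
        | cons b2 t2 =>
          obtain ⟨h', t', hgr⟩ : ∃ a l, glens (b2 :: t2) = a :: l := by
            cases hg : glens (b2 :: t2)
            · exact absurd hg (glens_ne_nil _)
            · exact ⟨_, _, rfl⟩
          rw [ih (b2 :: t2) 0 0 (by simpa using hlen) (by simp) le_rfl le_rfl (Or.inr ⟨rfl, rfl⟩)]
          rw [glens_false]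
          simp only [hgr, addHead, Int.toNat_zero, Nat.add_zero, List.headD_cons, pairsB]
          push_cast
          omega
      · -- leading true
        rw [bestF]
        simp only [ite_true]
        cases rest with
        | nil =>
          simp only [bestF, glens, addHead, pairsB, List.headD_cons]
          push_cast
          omega
        | cons b2 t2 =>
          obtain ⟨h', t', hgr⟩ : ∃ a l, glens (b2 :: t2) = a :: l := by
            cases hg : glens (b2 :: t2)
            · exact absurd hg (glens_ne_nil _)
            · exact ⟨_, _, rfl⟩
          cases b2
          · -- true :: false :: r2
            rw [bestF]
            simp only [Bool.false_eq_true, ite_false, ite_self]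
            cases t2 with
            | nil =>
              simp only [bestF, glens, addHead, pairsB, List.headD_cons, List.headD_nil,
                ite_false, Bool.false_eq_true]
              push_cast
              omega
            | cons b3 t3 =>
              obtain ⟨h2, t2', hgr2⟩ : ∃ a l, glens (b3 :: t3) = a :: l := by
                cases hg : glens (b3 :: t3)
                · exact absurd hg (glens_ne_nil _)
                · exact ⟨_, _, rfl⟩
              have hlen2 : (b3 :: t3).length ≤ k := by simp at hlen ⊢; omega
              have hdisj2 : (b3 :: t3).headD false = true ∨
                  ((0 : Int) = 0 ∧ (if (b3 :: t3).headD false then c + 1 else 0) = 0) := by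
                cases b3
                · right; simp
                · left; simp
              have hp2 : 0 ≤ (if (b3 :: t3).headD false then c + 1 else 0) := by
                split <;> omega
              rw [ih (b3 :: t3) 0 _ hlen2 (by simp) le_rfl hp2 hdisj2]
              rw [glens_true, glens_false]
              simp only [hgr2, addHead, Int.toNat_zero, Nat.add_zero, List.headD_cons,
                List.tail_cons, pairsB]
              cases b3
              · -- double zero: next group starts with false, so h2 = 0
                have h20 : h2 = 0 := by
                  rw [glens_false] at hgr2
                  injection hgr2 with e _
                  omega
                subst h20
                simp only [List.headD_cons, Bool.false_eq_true, ite_false]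
                push_cast
                omega
              · simp only [List.headD_cons, ite_true]
                push_cast
                omega
          · -- true :: true :: t2
            have hlen2 : (true :: t2).length ≤ k := by simp at hlen ⊢; omega
            rw [ih (true :: t2) (c + 1) p hlen2 (by simp) (by omega) hp (Or.inl (by simp))]
            rw [glens_true (true :: t2)]
            simp only [hgr, addHead, List.headD_cons, List.tail_cons]
            have ht : (c + 1).toNat = c.toNat + 1 := by omega
            rw [ht]
            have hlist : h' + 1 + c.toNat = h' + (c.toNat + 1) := by omega
            rw [hlist]
            push_cast
            omega

theorem modLast_cons (x : Nat) (g : List Nat) (h : g ≠ []) :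
    modLast (x :: g) = x :: modLast g := by
  match g with
  | y :: t => rw [modLast]

theorem modLast_append (ys : List Nat) (x : Nat) : modLast (ys ++ [x]) = ys ++ [x + 1] := by
  induction ys with
  | nil => simp [modLast]
  | cons y ys ih => rw [List.cons_append, modLast_cons y _ (by simp), ih]; simp

theorem glens_append_true (L : List Bool) : glens (L ++ [true]) = modLast (glens L) := by
  induction L with
  | nil => simp [glens, modLast]
  | cons b t ih =>
    cases b
    · rw [List.cons_append, glens_false, glens_false, ih,
        modLast_cons 0 _ (glens_ne_nil t)]
    · rw [List.cons_append, glens_true, glens_true, ih]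
      cases hg : glens t with
      | nil => exact absurd hg (glens_ne_nil t)
      | cons g gs =>
        cases gs with
        | nil => simp [modLast]
        | cons y ys =>
          rw [modLast_cons g _ (by simp)]
          simp only [List.headD_cons, List.tail_cons]
          rw [modLast_cons (g + 1) _ (by simp)]

theorem glens_append_false (L : List Bool) : glens (L ++ [false]) = glens L ++ [0] := by
  induction L with
  | nil => simp [glens]
  | cons b t ih =>
    cases b
    · rw [List.cons_append, glens_false, glens_false, ih, List.cons_append]
    · rw [List.cons_append, glens_true, glens_true, ih]
      cases hg : glens t with
      | nil => exact absurd hg (glens_ne_nil t)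
      | cons g gs => simp
theorem glens_reverse (L : List Bool) : glens L.reverse = (glens L).reverse := by
  induction L with
  | nil => rfl
  | cons b t ih =>
    cases b
    · rw [List.reverse_cons, glens_append_false, ih, glens_false, List.reverse_cons]
    · rw [List.reverse_cons, glens_append_true, ih, glens_true]
      cases hg : glens t with
      | nil => exact absurd hg (glens_ne_nil t)
      | cons g gs =>
        simp only [List.headD_cons, List.tail_cons, List.reverse_cons]
        rw [modLast_append]

theorem pairsB_append (l : List Nat) (x : Nat) (h : l ≠ []) :
    pairsB (l ++ [x]) = max (pairsB l) ((l.getLast?).getD 0 + x) := by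
  induction l with
  | nil => simp at h
  | cons a t ih =>
    cases t with
    | nil => simp [pairsB]
    | cons b t' =>
      rw [List.cons_append, List.cons_append]
      rw [show pairsB (a :: b :: (t' ++ [x])) = max (a + b) (pairsB (b :: (t' ++ [x]))) from rfl]
      rw [← List.cons_append, ih (by simp)]
      rw [show pairsB (a :: b :: t') = max (a + b) (pairsB (b :: t')) from rfl]
      simp only [List.getLast?_cons_cons]
      omega
theorem pairsB_reverse (l : List Nat) : pairsB l.reverse = pairsB l := by
  induction l with
  | nil => rfl
  | cons a t ih =>
    cases t with
    | nil => rfl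
    | cons b t' =>
      rw [List.reverse_cons, pairsB_append _ _ (by simp), ih]
      rw [List.getLast?_reverse]
      rw [show pairsB (a :: b :: t') = max (a + b) (pairsB (b :: t')) from rfl]
      simp
      omega
theorem pairsB_eq_pairsMaxN (a b : Nat) (t : List Nat) : pairsB (a :: b :: t) = pairsMaxN (a :: b :: t) := by
  induction t generalizing a b with
  | nil => simp [pairsB, pairsMaxN]
  | cons c t' ih =>
    rw [show pairsB (a :: b :: c :: t') = max (a + b) (pairsB (b :: c :: t')) from rfl, ih b c]
    rfl

theorem glens_len_two_of_mem (L : List Bool) (h : false ∈ L) : 2 ≤ (glens L).length := by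
  induction L with
  | nil => simp at h
  | cons b t ih =>
    cases b
    · rw [glens_false]
      have := List.length_pos_iff.mpr (glens_ne_nil t)
      simp; omega
    · rw [glens_true]
      simp at h
      have := ih h
      have ht := List.length_pos_iff.mpr (glens_ne_nil t)
      simp at this ⊢
      omega
theorem toDigitsCore_eq (fuel : Nat) : ∀ (n : Nat) (acc : List Char), 0 < n → n ≤ fuel →
    Nat.toDigitsCore 2 fuel n acc = (List.map bitChar (natBits n)).reverse ++ acc := by
  induction fuel with
  | zero => intro n acc h1 h2; omega
  | succ f ih =>
    intro n acc h1 h2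
    rw [Nat.toDigitsCore]
    have hd : (n % 2).digitChar = bitChar (decide (n % 2 = 1)) := by
      have : n % 2 = 0 ∨ n % 2 = 1 := by omega
      rcases this with h | h <;> simp [h, Nat.digitChar, bitChar]
    by_cases hz : n / 2 = 0
    · simp only [hz, if_pos rfl]
      rw [natBits_pos n h1, hz, natBits_zero]
      simp [hd]
    · simp only [hz, if_neg hz]
      rw [ih (n / 2) _ (by omega) (by omega)]
      rw [natBits_pos n h1]
      simp [hd]

theorem toDigits_eq (n : Nat) (h : 0 < n) :
    Nat.toDigits 2 n = (List.map bitChar (natBits n)).reverse := by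
  rw [Nat.toDigits, toDigitsCore_eq (n + 1) n [] h (by omega)]
  simp

theorem mySplit_ne_nil (cs : List Char) : mySplit cs ≠ [] := by
  cases cs with
  | nil => simp [mySplit]
  | cons c t =>
    rw [mySplit]
    split
    · simp
    · cases hms : mySplit t <;> simp [consHead]

theorem splitOn_go_eq (l : List Char) : ∀ (fuel : Nat) (cur : List Char) (acc : List (List Char)),
    l.length < fuel →
    PySem.Chars.splitOn.go ['0'] fuel l cur acc = acc.reverse ++ consHead cur.reverse (mySplit l) := by
  induction l with
  | nil =>
    intro fuel cur acc hf
    match fuel with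
    | f + 1 =>
      rw [PySem.Chars.splitOn.go]
      · simp [mySplit, consHead]
      · omega
  | cons c rest ih =>
    intro fuel cur acc hf
    match fuel with
    | f + 1 =>
      rw [PySem.Chars.splitOn.go]
      by_cases hc : c = '0'
      · subst hc
        have hpre : List.isPrefixOf ['0'] ('0' :: rest) = true := by
          simp [List.isPrefixOf]
        simp only [hpre, ite_true, List.length_cons, List.length_nil, List.drop_succ_cons,
          List.drop_zero]
        rw [ih f [] (cur.reverse :: acc) (by simp at hf ⊢; omega)]
        cases hms : mySplit rest with
        | nil => exact absurd hms (mySplit_ne_nil _)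
        | cons g gs =>
          simp [mySplit, consHead, hms]
      · have hpre : List.isPrefixOf ['0'] (c :: rest) = false := by
          simp [List.isPrefixOf]
          exact fun h => absurd h.symm hc
        simp only [hpre, Bool.false_eq_true, ite_false]
        rw [ih f (c :: cur) acc (by simp at hf ⊢; omega)]
        cases hms : mySplit rest with
        | nil => exact absurd hms (mySplit_ne_nil _)
        | cons g gs =>
          simp [mySplit, consHead, hms, hc]

theorem splitOn_eq_mySplit (cs : List Char) : PySem.Chars.splitOn cs ['0'] = mySplit cs := by
  rw [PySem.Chars.splitOn, splitOn_go_eq cs (cs.length + 1) [] [] (by omega)]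
  cases hms : mySplit cs with
  | nil => exact absurd hms (mySplit_ne_nil _)
  | cons g gs => simp [consHead]

theorem mySplit_lengths (M : List Bool) :
    (mySplit (List.map bitChar M)).map List.length = glens M := by
  induction M with
  | nil => rfl
  | cons b t ih =>
    cases b
    · simp only [List.map_cons, bitChar, Bool.false_eq_true, ite_false]
      rw [mySplit, if_pos rfl, glens_false]
      simpa using ih
    · simp only [List.map_cons, bitChar, ite_true]
      rw [mySplit, if_neg (by decide), glens_true]
      cases hms : mySplit (List.map bitChar t) with
      | nil => exact absurd hms (mySplit_ne_nil _)
      | cons g gs =>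
        rw [hms] at ih
        rw [← ih]
        simp [consHead]

theorem mySplit_no_zero (cs : List Char) (h : '0' ∉ cs) : mySplit cs = [cs] := by
  induction cs with
  | nil => rfl
  | cons c t ih =>
    simp only [List.mem_cons, not_or] at h
    rw [mySplit, if_neg (fun hc => h.1 hc.symm), ih h.2]
    simp [consHead]

theorem max?_fold (l : List Int) : ∀ x : Int,
    PySem.List.max? (x :: l) (fun y => y) = some (List.foldl max x l) := by
  induction l with
  | nil => intro x; rfl
  | cons y t ih =>
    intro x
    have h1 : PySem.List.max? (x :: y :: t) (fun y => y)
        = PySem.List.max? (max x y :: t) (fun y => y) := by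
      simp only [PySem.List.max?, List.foldl_cons]
      congr 1
      rcases max_choice x y with h | h <;> rw [h] <;> by_cases hxy : x < y <;> simp [hxy] <;> omega
    rw [h1, ih]
    simp [List.foldl_cons]

theorem foldl_max_pairs (t : List (List Char)) : ∀ (b : List Char) (x : Int), 0 ≤ x →
    List.foldl max x (((b :: t).zip t).map (fun p => ((p.1.length : Int) + (p.2.length : Int))))
      = max x (pairsMaxN ((b :: t).map List.length) : Int) := by
  induction t with
  | nil => intro b x hx; simp [pairsMaxN]; omega
  | cons c t' ih =>
    intro b x hx
    simp only [List.zip_cons_cons, List.map_cons, List.foldl_cons]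
    rw [ih c (max x ((b.length : Int) + (c.length : Int))) (by omega)]
    simp only [List.map_cons]
    have hpm : pairsMaxN (b.length :: c.length :: t'.map List.length)
        = max (b.length + c.length) (pairsMaxN (c.length :: t'.map List.length)) := rfl
    rw [hpm]
    push_cast
    omega

theorem band_neg_ne_zero (num : Int) (h : num ≤ -2) : PySem.Int.band (num + 1) num ≠ 0 := by
  rw [PySem.Int.band]
  have h1 : ¬ (0 ≤ num + 1) := by omega
  have h2 : ¬ (0 ≤ num) := by omega
  rw [if_neg h1, if_neg h2]
  omega

-- ===== VERDICT (by name: the statement is the Claim_ definition above) =====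
theorem addHead_zero (g : List Nat) : addHead 0 g = g := by
  cases g <;> simp [addHead]

theorem longestSeqOnes_spec : Claim_unchanged_longestSeqOnes := by
  intro num _ hD
  show longestSeqOnes num = longestSeqOnes_alt num
  rcases lt_trichotomy num 0 with hneg | h0 | hpos
  · -- num < 0 and num ≠ -1, so num ≤ -2: guard fails, loop does not run, B takes its ≤ 0 branch
    have hne1 : num ≠ -1 := fun h => hD h
    have h2 : num ≤ -2 := by omega
    rw [longestSeqOnes, if_neg (by rintro ⟨hb, -⟩; exact band_neg_ne_zero num h2 hb)]
    rw [longestSeqOnesLoop, dif_neg (by omega)]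
    rw [longestSeqOnes_alt, if_pos (by omega)]
  · subst h0
    rw [longestSeqOnes, if_neg (by rintro ⟨-, hb⟩; exact hb rfl)]
    rw [longestSeqOnesLoop, dif_neg (by omega)]
    rw [longestSeqOnes_alt, if_pos le_rfl]
  · -- num > 0
    have hnum : ((num.toNat : Nat) : Int) = num := Int.toNat_of_nonneg (by omega)
    set n := num.toNat with hn
    have hn0 : 0 < n := by omega
    have hd : (PySem.Int.pyBin num).toList = '0' :: 'b' :: Nat.toDigits 2 n := by
      rw [PySem.Int.toList_pyBin, PySem.Int.toBinChars0b, if_neg (by omega)]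
    have hdig : Nat.toDigits 2 n = (List.map bitChar (natBits n)).reverse := toDigits_eq n hn0
    have hband : PySem.Int.band (num + 1) num = (((n + 1) &&& n : Nat) : Int) := by
      have := PySem.Int.band_natCast (n + 1) n
      rw [← hnum]
      push_cast at this ⊢
      exact this
    have hMrev : Nat.toDigits 2 n = List.map bitChar (natBits n).reverse := by
      rw [hdig, List.map_reverse]
    by_cases hall : (n + 1) &&& n = 0
    · -- all ones: A takes the guard, B sees a single group
      have hmem : false ∉ natBits n := (land_succ_iff n).mp hall
      have hzero : '0' ∉ List.map bitChar (natBits n).reverse := by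
        intro hz
        simp only [List.mem_map, List.mem_reverse] at hz
        obtain ⟨b, hb, hbc⟩ := hz
        cases b
        · exact hmem hb
        · simp [bitChar] at hbc
      rw [longestSeqOnes, if_pos ⟨by rw [hband, hall]; rfl, by omega⟩]
      rw [longestSeqOnes_alt, if_neg (by omega)]
      simp only [PySem.Chars.slice_eq_listSlice,
        PySem.List.slice_from _ (by omega : (0 : Int) ≤ 2), hd,
        show Int.toNat 2 = 2 from rfl, List.drop_succ_cons, List.drop_zero]
      rw [splitOn_eq_mySplit, hMrev, mySplit_no_zero _ hzero]
      simp [PySem.Str.len, hd, hdig]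
      omega
    · -- a zero bit exists: A runs the loop, B joins adjacent one-runs
      have hmem : false ∈ natBits n := by
        by_contra h
        exact hall ((land_succ_iff n).mpr h)
      have hbits_ne : natBits n ≠ [] := by rw [natBits_pos n hn0]; simp
      obtain ⟨h0', g2, grest, hgl⟩ : ∃ a b t, glens (natBits n) = a :: b :: t := by
        have h2 := glens_len_two_of_mem _ hmem
        match hg : glens (natBits n) with
        | a :: b :: t => exact ⟨a, b, t, rfl⟩
        | [] => rw [hg] at h2; simp at h2
        | [a] => rw [hg] at h2; simp at h2
      -- A
      have hA : longestSeqOnes num = 1 + ((pairsB (glens (natBits n)) : Nat) : Int) := by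
        rw [longestSeqOnes, if_neg (by
          rintro ⟨hb, -⟩
          rw [hband] at hb
          exact hall (by exact_mod_cast hb))]
        rw [← hnum, loop_eq_listLoop n 0 0 1,
          listLoop_eq_max _ _ _ _ le_rfl le_rfl (by omega),
          main_bestF (natBits n).length (natBits n) 0 0 le_rfl hbits_ne le_rfl le_rfl
            (Or.inr ⟨rfl, rfl⟩)]
        rw [Int.toNat_zero, addHead_zero, hgl]
        have hp : pairsB (h0' :: g2 :: grest) = max (h0' + g2) (pairsB (g2 :: grest)) := rfl
        simp only [List.headD_cons]
        push_cast [hp]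
        omega
      -- B
      have hlens : (mySplit (Nat.toDigits 2 n)).map List.length = glens (natBits n).reverse := by
        rw [hMrev]; exact mySplit_lengths _
      have hglrev : glens (natBits n).reverse = (glens (natBits n)).reverse := glens_reverse _
      have hlen2 : 2 ≤ (mySplit (Nat.toDigits 2 n)).length := by
        have := congrArg List.length hlens
        simp only [List.length_map] at this
        rw [this, hglrev, List.length_reverse, hgl]
        simp
      obtain ⟨g0, g1, gs, hgroups⟩ : ∃ a b t, mySplit (Nat.toDigits 2 n) = a :: b :: t := by
        match hg : mySplit (Nat.toDigits 2 n) with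
        | a :: b :: t => exact ⟨a, b, t, rfl⟩
        | [] => rw [hg] at hlen2; simp at hlen2
        | [a] => rw [hg] at hlen2; simp at hlen2
      rw [hA, longestSeqOnes_alt, if_neg (by omega)]
      simp only [PySem.Chars.slice_eq_listSlice,
        PySem.List.slice_from _ (by omega : (0 : Int) ≤ 2), hd,
        show Int.toNat 2 = 2 from rfl, List.drop_succ_cons, List.drop_zero]
      rw [splitOn_eq_mySplit, hgroups]
      rw [if_neg (by
        rw [← hgroups]
        have := congrArg List.length hlens
        simp only [List.length_map] at this
        omega)]
      simp only [List.drop_succ_cons, List.drop_zero, List.zip_cons_cons, List.map_cons]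
      rw [max?_fold, Option.getD_some, foldl_max_pairs gs g1 _ (by positivity)]
      have hchain : (pairsB (glens (natBits n))) = pairsMaxN ((g0 :: g1 :: gs).map List.length) := by
        have hml : (g0 :: g1 :: gs).map List.length = (glens (natBits n)).reverse := by
          rw [← hgroups, hlens, hglrev]
        simp only [List.map_cons] at hml ⊢
        rw [← pairsB_eq_pairsMaxN, hml, pairsB_reverse]
      have hpm : pairsMaxN ((g0 :: g1 :: gs).map List.length)
          = max (g0.length + g1.length) (pairsMaxN ((g1 :: gs).map List.length)) := rfl
      rw [hchain, hpm]
      push_cast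
      omega

theorem longestSeqOnes_changed : Claim_changed_longestSeqOnes := by
  unfold Claim_changed_longestSeqOnes; decide

theorem longestSeqOnes_tight : Claim_exact_longestSeqOnes := by
  unfold Claim_exact_longestSeqOnes
  intro num _ hD
  subst hD
  decide
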